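-- pv_equiv track=rewrite | github.com/tiberius1701d/paramem | paramem/graph/qa_generator.py | partition_relations
-- ===== SOURCE A (Python) =====
-- _PROCEDURAL_PREDICATES = frozenset(
--     {
--         "prefers",
--         "likes",
--         "dislikes",
--         "has_hobby",
--         "drinks",
--         "eats",
--         "watches",
--         "listens_to",
--         "avoids",
--         "favorite",
--     }
-- )
--
-- def filter_procedural_relations(relations: list[dict]) -> list[dict]:
--     """Filter relations that represent behavioral preferences or habits.
--
--     Primary gate: relation_type == "preference" (catches model-coined predicates).
--     Secondary: predicate in supplementary set (catches mis-tagged preferences).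
--     """
--     result = []
--     for rel in relations:
--         if rel.get("relation_type") == "preference":
--             result.append(rel)
--         elif rel.get("predicate", "").lower() in _PROCEDURAL_PREDICATES:
--             result.append(rel)
--     return result
--
-- def partition_relations(
--     relations: list[dict], procedural_enabled: bool
-- ) -> tuple[list[dict], list[dict]]:
--     """Split session relations into (episodic, procedural) sets.
--
--     When procedural_enabled=True, preference relations route to the procedural
--     adapter and are removed from the episodic set to avoid duplicate encoding.
--     When procedural_enabled=False, everything stays in episodic so preferences
--     are never lost.
--
--     Called per-extraction so config changes are picked up automatically.
--     """
--     if not procedural_enabled: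
--         return list(relations), []
--     procedural = filter_procedural_relations(relations)
--     proc_ids = {id(r) for r in procedural}
--     episodic = [r for r in relations if id(r) not in proc_ids]
--     return episodic, procedural
-- ===== SOURCE B (Python) =====
-- _PROCEDURAL_PREDICATES = frozenset(
--     {
--         "prefers",
--         "likes",
--         "dislikes",
--         "has_hobby",
--         "drinks",
--         "eats",
--         "watches",
--         "listens_to",
--         "avoids",
--         "favorite",
--     }
-- )
--
--
-- def partition_relations(relations, procedural_enabled):
--     if not procedural_enabled:
--         return list(relations), []
--     episodic, procedural = [], []
--     for rel in relations:
--         if (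
--             rel.get("relation_type") == "preference"
--             or rel.get("predicate", "").lower() in _PROCEDURAL_PREDICATES
--         ):
--             procedural.append(rel)
--         else:
--             episodic.append(rel)
--     return episodic, procedural
-- ===== Notes on version B (the rewrite author's own statement) =====
-- stated objective: simpler
-- what changed: One partitioning pass appending each relation to episodic or procedural in place of the helper's filter pass plus an id-set and a second membership-filtering pass.
import Mathlib
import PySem

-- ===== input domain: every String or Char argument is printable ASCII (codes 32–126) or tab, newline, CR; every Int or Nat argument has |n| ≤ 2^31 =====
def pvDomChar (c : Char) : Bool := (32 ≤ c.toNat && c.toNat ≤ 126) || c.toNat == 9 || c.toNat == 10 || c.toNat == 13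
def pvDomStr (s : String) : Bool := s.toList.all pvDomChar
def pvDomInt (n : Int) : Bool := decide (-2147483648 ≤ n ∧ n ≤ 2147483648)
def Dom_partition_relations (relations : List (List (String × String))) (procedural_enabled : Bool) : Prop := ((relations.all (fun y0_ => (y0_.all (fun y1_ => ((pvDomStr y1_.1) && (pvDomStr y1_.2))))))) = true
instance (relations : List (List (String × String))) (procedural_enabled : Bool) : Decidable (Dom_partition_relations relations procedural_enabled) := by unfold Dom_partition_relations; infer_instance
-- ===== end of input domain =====

-- B replaces A's filter-helper-plus-id-set two-pass structure with a single partitioning pass (objective: simpler); same values everywhere.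

-- ===== PORT A =====
-- id-set note: Python removes procedural relations from episodic by object id; since the
-- classification is a pure function of the relation's value, id-membership coincides with
-- value-membership here, so the port uses value membership (List.contains).
def proceduralPredicates : PySem.Set String :=
  PySem.Set.ofList ["prefers", "likes", "dislikes", "has_hobby", "drinks", "eats",
    "watches", "listens_to", "avoids", "favorite"]

def filter_procedural_relations (relations : List (List (String × String))) :
    List (List (String × String)) :=
  relations.foldl (fun result rel =>
    if (PySem.Dict.mk rel).get? "relation_type" == some "preference" then result ++ [rel]
    else if PySem.Set.contains proceduralPredicates
        (PySem.Str.lower ((PySem.Dict.mk rel).getD "predicate" "")) then result ++ [rel]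
    else result) []

def partition_relations (relations : List (List (String × String))) (procedural_enabled : Bool) : (List (List (String × String))) × (List (List (String × String))) :=
  if !procedural_enabled then (relations, [])
  else
    let procedural := filter_procedural_relations relations
    let episodic := relations.filter (fun r => !(procedural.contains r))
    (episodic, procedural)

-- ===== PORT B =====
def isProceduralB (rel : List (String × String)) : Bool :=
  (PySem.Dict.mk rel).get? "relation_type" == some "preference"
    || PySem.Set.contains proceduralPredicates
        (PySem.Str.lower ((PySem.Dict.mk rel).getD "predicate" ""))

def partition_relations_alt (relations : List (List (String × String))) (procedural_enabled : Bool) : (List (List (String × String))) × (List (List (String × String))) :=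
  if !procedural_enabled then (relations, [])
  else
    relations.foldl
      (fun (acc : List (List (String × String)) × List (List (String × String))) rel =>
        if isProceduralB rel then (acc.1, acc.2 ++ [rel]) else (acc.1 ++ [rel], acc.2))
      ([], [])

-- ===== PRECONDITION & SPEC =====
def Spec_partition_relations (relations : List (List (String × String))) (procedural_enabled : Bool) (out : (List (List (String × String))) × (List (List (String × String)))) : Prop := out = partition_relations_alt relations procedural_enabled
instance (relations : List (List (String × String))) (procedural_enabled : Bool) (out : (List (List (String × String))) × (List (List (String × String)))) : Decidable (Spec_partition_relations relations procedural_enabled out) := by unfold Spec_partition_relations; infer_instance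

-- ===== CLAIM (what is proved, stated in full; the proofs are below) =====
def Claim_equal_partition_relations : Prop := ∀ (relations : List (List (String × String))) (procedural_enabled : Bool), Dom_partition_relations relations procedural_enabled → Spec_partition_relations relations procedural_enabled (partition_relations relations procedural_enabled)

-- ===== LEMMAS AND PROOFS =====

lemma filterA_eq (relations : List (List (String × String))) :
    filter_procedural_relations relations = relations.filter isProceduralB := by
  have hfun : (fun (result : List (List (String × String))) rel =>
      if (PySem.Dict.mk rel).get? "relation_type" == some "preference" then result ++ [rel]
      else if PySem.Set.contains proceduralPredicates
          (PySem.Str.lower ((PySem.Dict.mk rel).getD "predicate" "")) then result ++ [rel]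
      else result)
      = (fun result rel => if isProceduralB rel then result ++ [rel] else result) := by
    funext result rel
    simp only [isProceduralB]
    by_cases h1 : (PySem.Dict.mk rel).get? "relation_type" == some "preference" <;>
      simp [h1]
  unfold filter_procedural_relations
  rw [hfun, PySem.List.foldl_append_if_eq_filter]
  simp

lemma foldB_eq (xs : List (List (String × String)))
    (e p : List (List (String × String))) :
    xs.foldl
      (fun (acc : List (List (String × String)) × List (List (String × String))) rel =>
        if isProceduralB rel then (acc.1, acc.2 ++ [rel]) else (acc.1 ++ [rel], acc.2))
      (e, p)
    = (e ++ xs.filter (fun r => !isProceduralB r), p ++ xs.filter isProceduralB) := by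
  induction xs generalizing e p with
  | nil => simp
  | cons x xs ih =>
    by_cases hx : isProceduralB x <;> simp [hx, ih]

lemma episodic_eq (relations : List (List (String × String))) :
    relations.filter (fun r => !((relations.filter isProceduralB).contains r))
      = relations.filter (fun r => !isProceduralB r) := by
  apply List.filter_congr
  intro r hr
  by_cases h : isProceduralB r <;> simp [List.mem_filter, hr, h]

-- ===== VERDICT (by name: the statement is the Claim_ definition above) =====
theorem partition_relations_spec : Claim_equal_partition_relations := by
  intro relations procedural_enabled _
  unfold Spec_partition_relations partition_relations partition_relations_alt
  cases procedural_enabled with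
  | false => rfl
  | true =>
    simp only [Bool.not_true, if_neg (by decide : ¬ (false = true))]
    rw [filterA_eq, foldB_eq relations [] [], episodic_eq]
    simp
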